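-- pv_equiv track=rewrite | github.com/Ewazer/simple-n-gram-model | main.py | four_gram
-- ===== SOURCE A (Python) =====
-- def clean_word(word):
--   word = word.strip('.;,-“’”:?—‘!()_').lower()
--   return word
--
-- def four_gram(text):
--   successor_map = {}
--   window = []
--
--   for line in text:
--     for word in line.split():
--       clean_word = word.strip('.;,-“’”:?—‘!()_').lower()
--       window.append(clean_word)
--
--       if len(window) == 4:
--         key = (window[0], window[1],window[2])
--         value = window[3]
--         if key not in successor_map:
--           successor_map[key] = [value]
--         else:
--           successor_map[key].append(value)
--         window.pop(0)
--
--   return(successor_map)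
-- ===== SOURCE B (Python) =====
-- def four_gram(text):
--   words = [w.strip('.;,-“’”:?—‘!()_').lower() for line in text for w in line.split()]
--   successor_map = {}
--   for key0, key1, key2, value in zip(words, words[1:], words[2:], words[3:]):
--     key = (key0, key1, key2)
--     if key not in successor_map:
--       successor_map[key] = [value]
--     else:
--       successor_map[key].append(value)
--   return successor_map
-- ===== Notes on version B (the rewrite author's own statement) =====
-- stated objective: alternative
-- what changed: B replaces A's streaming size-4 window with append/pop(0) maintained across a nested line/word loop by first materializing the flat list of cleaned words and then iterating over zip(words, words[1:], words[2:], words[3:]) to collect each 4-gram.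
import Mathlib
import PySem

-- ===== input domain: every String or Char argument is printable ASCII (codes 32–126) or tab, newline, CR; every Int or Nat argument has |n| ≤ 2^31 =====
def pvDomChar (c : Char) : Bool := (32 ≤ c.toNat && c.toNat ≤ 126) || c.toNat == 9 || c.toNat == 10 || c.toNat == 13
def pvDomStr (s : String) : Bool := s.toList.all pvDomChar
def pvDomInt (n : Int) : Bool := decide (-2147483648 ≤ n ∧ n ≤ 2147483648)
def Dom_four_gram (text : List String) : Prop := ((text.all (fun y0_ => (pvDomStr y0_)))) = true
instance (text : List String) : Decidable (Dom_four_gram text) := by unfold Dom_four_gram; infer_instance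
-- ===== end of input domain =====

-- B drops A's streaming size-4 window with pop(0) for a flat cleaned-word list scanned by a 4-ary zip; same dict, alternative traversal.

-- word.strip('.;,-“’”:?—‘!()_').lower()  (both Pythons compute exactly this expression)
def pvClean (w : String) : String := PySem.Str.lower (PySem.Str.stripChars w ".;,-“’”:?—‘!()_")

-- ===== PORT A =====
-- one iteration of A's inner loop body on the already-cleaned word: append to window,
-- and when len(window) == 4 (expressed as the 4-element match) record key/value and pop(0)
def pvStepA (st : PySem.Dict (List String) (List String) × List String) (w : String) :
    PySem.Dict (List String) (List String) × List String :=
  let window := st.2 ++ [w]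
  match window with
  | [w0, w1, w2, w3] =>
      let key := [w0, w1, w2]
      let d := if st.1.contains key = false then st.1.insert key [w3]
               else st.1.modify key [] (· ++ [w3])
      (d, [w1, w2, w3])
  | _ => (st.1, window)

def four_gram (text : List String) : List (List String × List String) :=
  ((text.foldl
      (fun st line => (PySem.Str.split₀ line).foldl (fun st w => pvStepA st (pvClean w)) st)
      (PySem.Dict.empty, [])).1).items

-- ===== PORT B =====
-- Python's 4-argument zip, ported as the direct recursion (exact: stops at the shortest list)
def pvZip4 {α : Type} : List α → List α → List α → List α → List (α × α × α × α)
  | a :: as, b :: bs, c :: cs, d :: ds => (a, b, c, d) :: pvZip4 as bs cs ds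
  | _, _, _, _ => []

-- B's loop body: insert-or-append for one (key0,key1,key2,value) quadruple
def pvStepB (d : PySem.Dict (List String) (List String)) (q : String × String × String × String) :
    PySem.Dict (List String) (List String) :=
  let key := [q.1, q.2.1, q.2.2.1]
  if d.contains key = false then d.insert key [q.2.2.2]
  else d.modify key [] (· ++ [q.2.2.2])

def four_gram_alt (text : List String) : List (List String × List String) :=
  let words := text.flatMap (fun line => (PySem.Str.split₀ line).map pvClean)
  ((pvZip4 words (PySem.List.slice words (some 1) none)
      (PySem.List.slice words (some 2) none)
      (PySem.List.slice words (some 3) none)).foldl pvStepB PySem.Dict.empty).items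

-- ===== PRECONDITION & SPEC =====
def Spec_four_gram (text : List String) (out : List (List String × List String)) : Prop := out = four_gram_alt text
instance (text : List String) (out : List (List String × List String)) : Decidable (Spec_four_gram text out) := by unfold Spec_four_gram; infer_instance

-- ===== CLAIM (what is proved, stated in full; the proofs are below) =====
def Claim_equal_four_gram : Prop := ∀ (text : List String), Dom_four_gram text → Spec_four_gram text (four_gram text)

-- ===== LEMMAS AND PROOFS =====

-- A's nested loop over lines/words is the single fold of pvStepA over the flat cleaned-word list
lemma pvFlatten (text : List String) (st : PySem.Dict (List String) (List String) × List String) :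
    text.foldl
      (fun st line => (PySem.Str.split₀ line).foldl (fun st w => pvStepA st (pvClean w)) st) st
    = (text.flatMap (fun line => (PySem.Str.split₀ line).map pvClean)).foldl pvStepA st := by
  induction text generalizing st with
  | nil => rfl
  | cons l ls ih =>
      simp only [List.flatMap_cons, List.foldl_cons, List.foldl_append, List.foldl_map, ih]

-- once the window is full, A's fold tracks B's zip4 fold
lemma pvLoop (ws : List String) (d : PySem.Dict (List String) (List String)) (a b c : String) :
    (ws.foldl pvStepA (d, [a, b, c])).1
    = (pvZip4 (a :: b :: c :: ws) (b :: c :: ws) (c :: ws) ws).foldl pvStepB d := by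
  induction ws generalizing d a b c with
  | nil => rfl
  | cons w ws ih =>
      show (ws.foldl pvStepA (pvStepB d (a, b, c, w), [b, c, w])).1
        = (pvZip4 (b :: c :: w :: ws) (c :: w :: ws) (w :: ws) ws).foldl pvStepB
            (pvStepB d (a, b, c, w))
      exact ih _ b c w

lemma pvMain (ws : List String) :
    (ws.foldl pvStepA (PySem.Dict.empty, [])).1
    = (pvZip4 ws ws.tail (ws.drop 2) (ws.drop 3)).foldl pvStepB PySem.Dict.empty := by
  match ws with
  | [] => rfl
  | [a] => rfl
  | [a, b] => rfl
  | a :: b :: c :: rest =>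
      show (rest.foldl pvStepA (PySem.Dict.empty, [a, b, c])).1
        = (pvZip4 (a :: b :: c :: rest) (b :: c :: rest) (c :: rest) rest).foldl pvStepB
            PySem.Dict.empty
      exact pvLoop rest PySem.Dict.empty a b c

-- ===== VERDICT (by name: the statement is the Claim_ definition above) =====
theorem four_gram_spec : Claim_equal_four_gram := by
  intro text _
  show four_gram text = four_gram_alt text
  unfold four_gram four_gram_alt
  rw [pvFlatten]
  simp only [PySem.List.slice_from_one,
      PySem.List.slice_from _ (by norm_num : (0:Int) ≤ 2),
      PySem.List.slice_from _ (by norm_num : (0:Int) ≤ 3)]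
  simpa using congrArg PySem.Dict.items (pvMain _)
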